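-- pv_equiv track=rewrite | github.com/dqandco/bioxai-hackathon | download_disulfide_data.py | _split_cif_row
-- ===== SOURCE A (Python) =====
-- def _split_cif_row(line: str) -> list[str]:
--     """Split a CIF data row, handling quoted strings."""
--     fields = []
--     i = 0
--     while i < len(line):
--         if line[i] in (" ", "\t"):
--             i += 1
--             continue
--         if line[i] in ("'", '"'):
--             quote = line[i]
--             i += 1
--             start = i
--             while i < len(line) and line[i] != quote:
--                 i += 1
--             fields.append(line[start:i])
--             i += 1  # skip closing quote
--         else:
--             start = i
--             while i < len(line) and line[i] not in (" ", "\t"):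
--                 i += 1
--             fields.append(line[start:i])
--     return fields
-- ===== SOURCE B (Python) =====
-- import re
--
-- _CIF_FIELD = re.compile(r"'([^']*)'?|\"([^\"]*)\"?|([^ \t]+)")
--
-- def _split_cif_row(line: str) -> list[str]:
--     """Split a CIF data row, handling quoted strings."""
--     fields = []
--     for m in _CIF_FIELD.finditer(line):
--         sq, dq, bare = m.group(1), m.group(2), m.group(3)
--         if sq is not None:
--             fields.append(sq)
--         elif dq is not None:
--             fields.append(dq)
--         else:
--             fields.append(bare)
--     return fields
-- ===== Notes on version B (the rewrite author's own statement) =====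
-- stated objective: idiomatic
-- what changed: Replaced the hand-written index-based character scanner with one compiled regular expression (single-quoted field with optional closing quote, double-quoted field likewise, or a bare run of non-space/non-tab characters) iterated via re.finditer, appending whichever capture group matched.
import Mathlib
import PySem

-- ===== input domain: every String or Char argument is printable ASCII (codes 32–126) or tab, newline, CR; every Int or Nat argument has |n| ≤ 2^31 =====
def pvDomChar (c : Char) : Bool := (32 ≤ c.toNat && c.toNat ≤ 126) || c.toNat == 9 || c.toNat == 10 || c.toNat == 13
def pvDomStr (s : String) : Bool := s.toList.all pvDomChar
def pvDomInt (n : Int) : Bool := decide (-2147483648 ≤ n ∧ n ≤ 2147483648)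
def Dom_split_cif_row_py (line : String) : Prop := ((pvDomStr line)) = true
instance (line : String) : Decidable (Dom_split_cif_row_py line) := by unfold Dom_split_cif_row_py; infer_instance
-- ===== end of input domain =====

-- B replaces A's hand-written index scanner by a single regular expression iterated over the line (idiomatic); same values everywhere.
-- Both loops are ported with a Nat fuel argument (initial fuel = the string length, always sufficient) to make them structural.

-- ===== PORT A =====
-- A's inner `while i < len(line) and line[i] != quote: i += 1` (index scan for the closing quote)
def pvScanQuoteF : Nat → List Char → Char → Nat → Nat
  | 0, _, _, i => i
  | f + 1, cs, q, i =>
    if h : i < cs.length then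
      if cs[i] ≠ q then pvScanQuoteF f cs q (i + 1) else i
    else i

-- A's inner `while i < len(line) and line[i] not in (" ", "\t"): i += 1` (index scan for the token end)
def pvScanWordF : Nat → List Char → Nat → Nat
  | 0, _, i => i
  | f + 1, cs, i =>
    if h : i < cs.length then
      if cs[i] ≠ ' ' ∧ cs[i] ≠ '\t' then pvScanWordF f cs (i + 1) else i
    else i

-- A's outer while loop over the index i; line[start:i] is ported as (drop start).take (i-start),
-- exact for these always-in-range nonnegative indices with start ≤ i.
def pvALoopF : Nat → List Char → Nat → List String
  | 0, _, _ => []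
  | f + 1, cs, i =>
    if h : i < cs.length then
      if cs[i] = ' ' ∨ cs[i] = '\t' then
        pvALoopF f cs (i + 1)
      else if cs[i] = '\'' ∨ cs[i] = '"' then
        let j := pvScanQuoteF cs.length cs cs[i] (i + 1)
        String.ofList ((cs.drop (i + 1)).take (j - (i + 1))) :: pvALoopF f cs (j + 1)
      else
        let j := pvScanWordF cs.length cs i
        String.ofList ((cs.drop i).take (j - i)) :: pvALoopF f cs j
    else []

def split_cif_row_py (line : String) : List String :=
  pvALoopF line.toList.length line.toList 0

-- ===== PORT B =====
-- Hand port (exact) of B's regex `'([^']*)'?|"([^"]*)"?|([^ \t]+)` driven by re.finditer: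
-- at each position try the three alternatives in order; every alternative consumes ≥ 1 char,
-- and where none matches (space/tab) the engine advances one position without emitting a match.
def pvBLoopF : Nat → List Char → List String
  | 0, _ => []
  | _ + 1, [] => []
  | f + 1, c :: rest =>
    if c = '\'' then
      -- alternative 1: '([^']*)'?  — group 1 is the run of non-quotes; closing quote optional
      String.ofList (rest.takeWhile (· ≠ '\'')) :: pvBLoopF f ((rest.dropWhile (· ≠ '\'')).drop 1)
    else if c = '"' then
      -- alternative 2: "([^"]*)"?
      String.ofList (rest.takeWhile (· ≠ '"')) :: pvBLoopF f ((rest.dropWhile (· ≠ '"')).drop 1)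
    else if c ≠ ' ' ∧ c ≠ '\t' then
      -- alternative 3: ([^ \t]+), greedy
      String.ofList ((c :: rest).takeWhile (fun x => x ≠ ' ' ∧ x ≠ '\t')) ::
        pvBLoopF f ((c :: rest).dropWhile (fun x => x ≠ ' ' ∧ x ≠ '\t'))
    else
      -- no alternative matches here: finditer advances one position
      pvBLoopF f rest

def split_cif_row_py_alt (line : String) : List String :=
  pvBLoopF line.toList.length line.toList

-- ===== PRECONDITION & SPEC =====
def Spec_split_cif_row_py (line : String) (out : List String) : Prop := out = split_cif_row_py_alt line
instance (line : String) (out : List String) : Decidable (Spec_split_cif_row_py line out) := by unfold Spec_split_cif_row_py; infer_instance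

-- ===== CLAIM (what is proved, stated in full; the proofs are below) =====
def Claim_equal_split_cif_row_py : Prop := ∀ (line : String), Dom_split_cif_row_py line → Spec_split_cif_row_py line (split_cif_row_py line)

-- ===== LEMMAS AND PROOFS =====

theorem pvTakeLen (p : Char → Bool) (l : List Char) :
    l.take (l.takeWhile p).length = l.takeWhile p :=
  (List.prefix_iff_eq_take.mp (List.takeWhile_prefix p)).symm

theorem pvDropLen (p : Char → Bool) (l : List Char) :
    l.drop (l.takeWhile p).length = l.dropWhile p := by
  have h := congrArg (List.drop (l.takeWhile p).length)
    (List.takeWhile_append_dropWhile (p := p) (l := l)).symm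
  rw [h, List.drop_left]

theorem pvScanQuoteF_eq (f : Nat) (cs : List Char) (q : Char) (i : Nat) :
    cs.length - i ≤ f → pvScanQuoteF f cs q i = i + ((cs.drop i).takeWhile (· ≠ q)).length := by
  fun_induction pvScanQuoteF f cs q i with
  | case1 cs q i =>
    intro hf
    rw [List.drop_eq_nil_of_le (by omega)]; simp
  | case2 f cs q i h hq ih =>
    intro hf
    rw [List.drop_eq_getElem_cons h, List.takeWhile_cons_of_pos (by simpa using hq)]
    simp only [List.length_cons, ih (by omega)]; omega
  | case3 f cs q i h hq =>
    intro _
    rw [List.drop_eq_getElem_cons h, List.takeWhile_cons_of_neg (by simp_all)]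
    simp
  | case4 f cs q i h =>
    intro _
    rw [List.drop_eq_nil_of_le (by omega)]; simp

theorem pvScanWordF_eq (f : Nat) (cs : List Char) (i : Nat) :
    cs.length - i ≤ f →
      pvScanWordF f cs i = i + ((cs.drop i).takeWhile (fun x => x ≠ ' ' ∧ x ≠ '\t')).length := by
  fun_induction pvScanWordF f cs i with
  | case1 cs i =>
    intro hf
    rw [List.drop_eq_nil_of_le (by omega)]; simp
  | case2 f cs i h hq ih =>
    intro hf
    rw [List.drop_eq_getElem_cons h, List.takeWhile_cons_of_pos (by simpa using hq)]
    simp only [List.length_cons, ih (by omega)]; omega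
  | case3 f cs i h hq =>
    intro _
    rw [List.drop_eq_getElem_cons h, List.takeWhile_cons_of_neg (by simp_all)]
    simp
  | case4 f cs i h =>
    intro _
    rw [List.drop_eq_nil_of_le (by omega)]; simp

theorem pvBLoopF_ws (f : Nat) (c : Char) (h : c = ' ' ∨ c = '\t') (rest : List Char) :
    pvBLoopF (f + 1) (c :: rest) = pvBLoopF f rest := by
  rcases h with h | h <;> subst h <;>
    rw [pvBLoopF, if_neg (by decide), if_neg (by decide), if_neg (by decide)]

theorem pvBLoopF_quote (f : Nat) (q : Char) (hq : q = '\'' ∨ q = '"') (rest : List Char) :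
    pvBLoopF (f + 1) (q :: rest) =
      String.ofList (rest.takeWhile (· ≠ q)) :: pvBLoopF f ((rest.dropWhile (· ≠ q)).drop 1) := by
  rcases hq with h | h <;> subst h
  · rw [pvBLoopF, if_pos rfl]
  · rw [pvBLoopF, if_neg (by decide), if_pos rfl]

theorem pvBLoopF_word (f : Nat) (c : Char) (h1 : c ≠ '\'') (h2 : c ≠ '"')
    (h3 : ¬(c = ' ' ∨ c = '\t')) (rest : List Char) :
    pvBLoopF (f + 1) (c :: rest) =
      String.ofList ((c :: rest).takeWhile (fun x => x ≠ ' ' ∧ x ≠ '\t')) ::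
        pvBLoopF f ((c :: rest).dropWhile (fun x => x ≠ ' ' ∧ x ≠ '\t')) := by
  rw [pvBLoopF, if_neg h1, if_neg h2, if_pos (by tauto)]

theorem pvBLoopF_fuel (g : Nat) (l : List Char) :
    ∀ g', l.length ≤ g → l.length ≤ g' → pvBLoopF g l = pvBLoopF g' l := by
  fun_induction pvBLoopF g l with
  | case1 l =>
    intro g' hg _
    obtain rfl : l = [] := List.eq_nil_of_length_eq_zero (by omega)
    cases g' <;> rfl
  | case2 f =>
    intro g' _ _
    cases g' <;> rfl
  | case3 f rest ih =>
    intro g' hg hg'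
    obtain ⟨g'', rfl⟩ : ∃ k, g' = k + 1 := ⟨g' - 1, by simp at hg'; omega⟩
    rw [pvBLoopF_quote g'' '\'' (Or.inl rfl)]
    have hd := List.length_dropWhile_le (p := (· ≠ '\'')) rest
    congr 1
    exact ih g'' (by simp only [List.length_drop]; simp at hg; omega)
      (by simp only [List.length_drop]; simp at hg'; omega)
  | case4 f rest h1 ih =>
    intro g' hg hg'
    obtain ⟨g'', rfl⟩ : ∃ k, g' = k + 1 := ⟨g' - 1, by simp at hg'; omega⟩
    rw [pvBLoopF_quote g'' '"' (Or.inr rfl)]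
    have hd := List.length_dropWhile_le (p := (· ≠ '"')) rest
    congr 1
    exact ih g'' (by simp only [List.length_drop]; simp at hg; omega)
      (by simp only [List.length_drop]; simp at hg'; omega)
  | case5 f c rest h1 h2 h3 ih =>
    intro g' hg hg'
    obtain ⟨g'', rfl⟩ : ∃ k, g' = k + 1 := ⟨g' - 1, by simp at hg'; omega⟩
    rw [pvBLoopF_word g'' c h1 h2 (by tauto)]
    have hcons : (c :: rest).dropWhile (fun x => x ≠ ' ' ∧ x ≠ '\t') =
        rest.dropWhile (fun x => x ≠ ' ' ∧ x ≠ '\t') :=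
      List.dropWhile_cons_of_pos (by simpa using h3)
    have hd := List.length_dropWhile_le (p := fun x => x ≠ ' ' ∧ x ≠ '\t') rest
    congr 1
    exact ih g'' (by rw [hcons]; simp at hg; omega) (by rw [hcons]; simp at hg'; omega)
  | case6 f c rest h1 h2 h3 ih =>
    intro g' hg hg'
    obtain ⟨g'', rfl⟩ : ∃ k, g' = k + 1 := ⟨g' - 1, by simp at hg'; omega⟩
    have hws : c = ' ' ∨ c = '\t' := by tauto
    rw [pvBLoopF_ws g'' c hws]
    exact ih g'' (by simp at hg; omega) (by simp at hg'; omega)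

theorem pvMainF (f : Nat) (cs : List Char) (i : Nat) :
    cs.length - i ≤ f → pvALoopF f cs i = pvBLoopF (cs.length - i) (cs.drop i) := by
  fun_induction pvALoopF f cs i with
  | case1 cs i =>
    intro hf
    rw [List.drop_eq_nil_of_le (by omega), show cs.length - i = 0 by omega]
    rfl
  | case2 f cs i h hws ih =>
    intro hf
    obtain ⟨m, hm⟩ : ∃ m, cs.length - i = m + 1 := ⟨cs.length - i - 1, by omega⟩
    rw [List.drop_eq_getElem_cons h, hm, pvBLoopF_ws m cs[i] hws (cs.drop (i + 1)),
      ih (by omega), show m = cs.length - (i + 1) by omega]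
  | case3 f cs i h hws hq j ih =>
    intro hf
    have hj : j = (i + 1) + ((cs.drop (i + 1)).takeWhile (· ≠ cs[i])).length :=
      pvScanQuoteF_eq cs.length cs cs[i] (i + 1) (by omega)
    have hlen : ((cs.drop (i + 1)).takeWhile (· ≠ cs[i])).length ≤ cs.length - (i + 1) := by
      have := (List.takeWhile_prefix (l := cs.drop (i + 1)) (· ≠ cs[i])).length_le
      simpa using this
    obtain ⟨m, hm⟩ : ∃ m, cs.length - i = m + 1 := ⟨cs.length - i - 1, by omega⟩
    rw [List.drop_eq_getElem_cons h, hm, pvBLoopF_quote m cs[i] hq (cs.drop (i + 1))]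
    congr 1
    · rw [hj, Nat.add_sub_cancel_left]
      exact congrArg String.ofList (pvTakeLen _ _)
    · rw [ih (by omega)]
      have hX : cs.drop (j + 1) = ((cs.drop (i + 1)).dropWhile (· ≠ cs[i])).drop 1 := by
        rw [← pvDropLen (· ≠ cs[i]) (cs.drop (i + 1)), List.drop_drop, List.drop_drop]
        congr 1
        omega
      rw [hX]
      refine pvBLoopF_fuel _ _ _ ?_ ?_ <;>
        · rw [← hX]
          simp only [List.length_drop]
          omega
  | case4 f cs i h hws hq j ih =>
    intro hf
    have hj : j = i + ((cs.drop i).takeWhile (fun x => x ≠ ' ' ∧ x ≠ '\t')).length :=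
      pvScanWordF_eq cs.length cs i (by omega)
    have hc : cs.drop i = cs[i] :: cs.drop (i + 1) := List.drop_eq_getElem_cons h
    have hpos : (0 : Nat) < ((cs.drop i).takeWhile (fun x => x ≠ ' ' ∧ x ≠ '\t')).length := by
      rw [hc, List.takeWhile_cons_of_pos (by simpa using (by tauto : cs[i] ≠ ' ' ∧ cs[i] ≠ '\t'))]
      simp
    have hlen : ((cs.drop i).takeWhile (fun x => x ≠ ' ' ∧ x ≠ '\t')).length ≤ cs.length - i := by
      have := (List.takeWhile_prefix (l := cs.drop i) (fun x => x ≠ ' ' ∧ x ≠ '\t')).length_le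
      simpa using this
    obtain ⟨m, hm⟩ : ∃ m, cs.length - i = m + 1 := ⟨cs.length - i - 1, by omega⟩
    rw [hm, hc, pvBLoopF_word m cs[i] (by tauto) (by tauto) hws (cs.drop (i + 1))]
    congr 1
    · rw [hj, hc, Nat.add_sub_cancel_left]
      exact congrArg String.ofList (pvTakeLen _ _)
    · rw [ih (by omega)]
      have hX : cs.drop j = (cs[i] :: cs.drop (i + 1)).dropWhile (fun x => x ≠ ' ' ∧ x ≠ '\t') := by
        rw [← pvDropLen (fun x => x ≠ ' ' ∧ x ≠ '\t') (cs[i] :: cs.drop (i + 1)), ← hc,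
          List.drop_drop, ← hj]
      rw [← hX]
      refine pvBLoopF_fuel _ _ _ ?_ ?_ <;>
        · simp only [List.length_drop]
          omega
  | case5 f cs i h =>
    intro _
    rw [List.drop_eq_nil_of_le (by omega), show cs.length - i = 0 by omega]
    rfl

-- ===== VERDICT (by name: the statement is the Claim_ definition above) =====
theorem split_cif_row_py_spec : Claim_equal_split_cif_row_py := by
  intro line _
  unfold Spec_split_cif_row_py split_cif_row_py split_cif_row_py_alt
  have h := pvMainF line.toList.length line.toList 0 (by omega)
  simpa using h
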